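-- pv_equiv track=rewrite | github.com/ZKing1000/Programming | Python/libraries/collisionDetection.py | complxObj
-- ===== SOURCE A (Python) =====
-- def complxObj(first,second,pastePos,pastePos2): #First and second are output from self.setup.
-- 	firstModified = [] #Collects parts of first that are in correlation with parts of second based on y coordinate.
-- 	secondModified = [] #For example: two images pasted, both 100 pixels tall, at 100 and 150 (In y coord); the last fifty lists of first would be saved and the first 50 lists of second would be saved.
-- 	for x in range(len(first)-1):
-- 		for y in range(len(second)-1):
-- 			if x + pastePos[1] == y + pastePos2[1]:
-- 				firstModified.append(first[x])
-- 				secondModified.append(second[y])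
-- 	orientation1,orientation2,orientation3,orientation4 = firstModified,secondModified,pastePos[0],pastePos2[0] #For when one image is in back of another inx coord.
-- 	if pastePos[0] > pastePos2[0]:
-- 		orientation1,orientation2,orientation3,orientation4 = secondModified,firstModified,pastePos2[0],pastePos[0]
-- 	for x in range(len(orientation1)-1):
-- 		if orientation1[x][0] + orientation1[x][1] + orientation3 >= orientation2[x][0] + orientation4 and orientation1[x][0] + orientation1[x][1] + orientation3 <= orientation2[x][0] + orientation2[x][1] + orientation4:
-- 			return True
-- ===== SOURCE B (Python) =====
-- def complxObj(first, second, pastePos, pastePos2):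
--     # Rows x of `first` and y of `second` are paired exactly when
--     # x + pastePos[1] == y + pastePos2[1], i.e. x = y + d with d fixed:
--     d = pastePos2[1] - pastePos[1]
--     lo = max(0, d)
--     hi = min(len(first) - 1, len(second) - 1 + d)
--     pairs = [(first[x], second[x - d]) for x in range(lo, hi)]
--     if pastePos[0] > pastePos2[0]:
--         pairs = [(s, f) for (f, s) in pairs]
--         o3, o4 = pastePos2[0], pastePos[0]
--     else:
--         o3, o4 = pastePos[0], pastePos2[0]
--     for p, q in pairs[:-1]:
--         s = p[0] + p[1] + o3
--         if q[0] + o4 <= s <= q[0] + q[1] + o4: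
--             return True
--     return None
-- ===== Notes on version B (the rewrite author's own statement) =====
-- stated objective: alternative
-- what changed: B replaces A's O(n*m) nested pairing loops (testing every (x,y) row pair against x+pastePos[1]==y+pastePos2[1]) by solving that equation directly: x = y + d with d = pastePos2[1]-pastePos[1], so the matched pairs are read off a single arithmetic index range and scanned once.
-- outside the precondition, e.g. on complxObj([[1, 2]], [[3, 4]], [7], [7]): A returns None, B raises IndexError; on complxObj([[0, 0], [0, 0], [0, 0]], [[9], [0, 0], [0, 0]], [0, 0], [0, 0]): A returns None, B returns None
import Mathlib
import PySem

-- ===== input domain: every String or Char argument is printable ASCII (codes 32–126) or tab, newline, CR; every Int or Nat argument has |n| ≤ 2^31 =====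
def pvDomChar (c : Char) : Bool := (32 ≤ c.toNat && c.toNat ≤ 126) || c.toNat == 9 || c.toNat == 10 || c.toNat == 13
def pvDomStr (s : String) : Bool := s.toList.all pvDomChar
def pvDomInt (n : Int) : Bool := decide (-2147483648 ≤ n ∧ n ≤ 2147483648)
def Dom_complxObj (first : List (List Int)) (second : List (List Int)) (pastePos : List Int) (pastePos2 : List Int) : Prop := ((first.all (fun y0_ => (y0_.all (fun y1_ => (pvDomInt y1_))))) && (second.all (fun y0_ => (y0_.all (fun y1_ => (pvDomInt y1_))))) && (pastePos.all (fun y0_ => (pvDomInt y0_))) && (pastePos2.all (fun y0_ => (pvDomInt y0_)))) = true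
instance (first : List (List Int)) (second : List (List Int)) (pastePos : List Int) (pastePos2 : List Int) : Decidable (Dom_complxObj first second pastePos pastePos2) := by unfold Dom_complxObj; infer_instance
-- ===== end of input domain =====

-- B reads the matched row pairs directly off the offset equation x = y + (pastePos2[1]-pastePos[1])
-- as one arithmetic index range instead of A's nested all-pairs pairing loops (alternative algorithm).

-- ===== PORT A =====
-- A's final loop: returns True at the first index satisfying the overlap test, else falls through (None).
def complxObjScan (o1 o2 : List (List Int)) (o3 o4 : Int) : List Int → Option Bool
  | [] => none
  | x :: rest =>
    if PySem.List.pyGetD (PySem.List.pyGetD o1 x []) 0 0 + PySem.List.pyGetD (PySem.List.pyGetD o1 x []) 1 0 + o3 ≥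
         PySem.List.pyGetD (PySem.List.pyGetD o2 x []) 0 0 + o4 ∧
       PySem.List.pyGetD (PySem.List.pyGetD o1 x []) 0 0 + PySem.List.pyGetD (PySem.List.pyGetD o1 x []) 1 0 + o3 ≤
         PySem.List.pyGetD (PySem.List.pyGetD o2 x []) 0 0 + PySem.List.pyGetD (PySem.List.pyGetD o2 x []) 1 0 + o4
    then some true else complxObjScan o1 o2 o3 o4 rest

-- indexing is via pyGetD: in-range under Pre_complxObj (Python raises IndexError outside it)
def complxObj (first : List (List Int)) (second : List (List Int)) (pastePos : List Int) (pastePos2 : List Int) : Option Bool :=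
  let fmsm :=
    (PySem.List.pyRange 0 ((first.length : Int) - 1) 1).foldl (fun acc x =>
      (PySem.List.pyRange 0 ((second.length : Int) - 1) 1).foldl (fun acc2 y =>
        if x + PySem.List.pyGetD pastePos 1 0 = y + PySem.List.pyGetD pastePos2 1 0 then
          (acc2.1 ++ [PySem.List.pyGetD first x []], acc2.2 ++ [PySem.List.pyGetD second y []])
        else acc2) acc)
      (([] : List (List Int)), ([] : List (List Int)))
  let swap := PySem.List.pyGetD pastePos 0 0 > PySem.List.pyGetD pastePos2 0 0
  let o1 := if swap then fmsm.2 else fmsm.1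
  let o2 := if swap then fmsm.1 else fmsm.2
  let o3 := if swap then PySem.List.pyGetD pastePos2 0 0 else PySem.List.pyGetD pastePos 0 0
  let o4 := if swap then PySem.List.pyGetD pastePos 0 0 else PySem.List.pyGetD pastePos2 0 0
  complxObjScan o1 o2 o3 o4 (PySem.List.pyRange 0 ((o1.length : Int) - 1) 1)

-- ===== PORT B =====
def complxObj_alt (first : List (List Int)) (second : List (List Int)) (pastePos : List Int) (pastePos2 : List Int) : Option Bool :=
  let d := PySem.List.pyGetD pastePos2 1 0 - PySem.List.pyGetD pastePos 1 0
  let lo := max 0 d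
  let hi := min ((first.length : Int) - 1) ((second.length : Int) - 1 + d)
  let pairs0 := (PySem.List.pyRange lo hi 1).map (fun x =>
      (PySem.List.pyGetD first x [], PySem.List.pyGetD second (x - d) []))
  let swap := PySem.List.pyGetD pastePos 0 0 > PySem.List.pyGetD pastePos2 0 0
  let pairs := if swap then pairs0.map (fun fs => (fs.2, fs.1)) else pairs0
  let o3 := if swap then PySem.List.pyGetD pastePos2 0 0 else PySem.List.pyGetD pastePos 0 0
  let o4 := if swap then PySem.List.pyGetD pastePos 0 0 else PySem.List.pyGetD pastePos2 0 0
  if (PySem.List.slice pairs none (some (-1))).any (fun pq =>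
      decide (PySem.List.pyGetD pq.2 0 0 + o4 ≤
              PySem.List.pyGetD pq.1 0 0 + PySem.List.pyGetD pq.1 1 0 + o3) &&
      decide (PySem.List.pyGetD pq.1 0 0 + PySem.List.pyGetD pq.1 1 0 + o3 ≤
              PySem.List.pyGetD pq.2 0 0 + PySem.List.pyGetD pq.2 1 0 + o4))
  then some true else none

-- ===== PRECONDITION & SPEC =====
-- Pre_ requires paste positions carrying at least (x, y) and, at every matched index the final scan can
-- reach, rows carrying at least (x, width): outside it A raises IndexError, except on degenerate inputs
-- where short-circuiting or an early True keeps A off the missing index (there A returns what B does, or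
-- B reads the pastePos[1] A never reached).
def Pre_complxObj (first : List (List Int)) (second : List (List Int)) (pastePos : List Int) (pastePos2 : List Int) : Prop :=
  2 ≤ pastePos.length ∧ 2 ≤ pastePos2.length ∧
  (∀ x ∈ PySem.List.pyRange (max 0 (PySem.List.pyGetD pastePos2 1 0 - PySem.List.pyGetD pastePos 1 0))
        (min ((first.length : Int) - 1)
             ((second.length : Int) - 1 + (PySem.List.pyGetD pastePos2 1 0 - PySem.List.pyGetD pastePos 1 0)) - 1) 1,
      2 ≤ (PySem.List.pyGetD first x []).length ∧
      2 ≤ (PySem.List.pyGetD second (x - (PySem.List.pyGetD pastePos2 1 0 - PySem.List.pyGetD pastePos 1 0)) []).length)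
instance (first : List (List Int)) (second : List (List Int)) (pastePos : List Int) (pastePos2 : List Int) : Decidable (Pre_complxObj first second pastePos pastePos2) := by unfold Pre_complxObj; infer_instance

def pvWitness_complxObj : List (List Int) × List (List Int) × List Int × List Int :=
  ([[0, 1], [2, 3]], [[4, 5], [6, 7]], [0, 0], [1, 1])

def Spec_complxObj (first : List (List Int)) (second : List (List Int)) (pastePos : List Int) (pastePos2 : List Int) (out : Option Bool) : Prop := out = complxObj_alt first second pastePos pastePos2
instance (first : List (List Int)) (second : List (List Int)) (pastePos : List Int) (pastePos2 : List Int) (out : Option Bool) : Decidable (Spec_complxObj first second pastePos pastePos2 out) := by unfold Spec_complxObj; infer_instance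

-- ===== CLAIM (what is proved, stated in full; the proofs are below) =====
def Claim_equal_complxObj : Prop := ∀ (first : List (List Int)) (second : List (List Int)) (pastePos : List Int) (pastePos2 : List Int), Dom_complxObj first second pastePos pastePos2 → Pre_complxObj first second pastePos pastePos2 → Spec_complxObj first second pastePos pastePos2 (complxObj first second pastePos pastePos2)

-- ===== LEMMAS AND PROOFS =====

lemma scan_eq_any (o1 o2 : List (List Int)) (o3 o4 : Int) (l : List Int) :
    complxObjScan o1 o2 o3 o4 l =
      if l.any (fun x =>
          decide (PySem.List.pyGetD (PySem.List.pyGetD o1 x []) 0 0 + PySem.List.pyGetD (PySem.List.pyGetD o1 x []) 1 0 + o3 ≥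
                    PySem.List.pyGetD (PySem.List.pyGetD o2 x []) 0 0 + o4 ∧
                  PySem.List.pyGetD (PySem.List.pyGetD o1 x []) 0 0 + PySem.List.pyGetD (PySem.List.pyGetD o1 x []) 1 0 + o3 ≤
                    PySem.List.pyGetD (PySem.List.pyGetD o2 x []) 0 0 + PySem.List.pyGetD (PySem.List.pyGetD o2 x []) 1 0 + o4))
      then some true else none := by
  induction l with
  | nil => simp [complxObjScan]
  | cons x rest ih =>
    by_cases h : (PySem.List.pyGetD (PySem.List.pyGetD o1 x []) 0 0 + PySem.List.pyGetD (PySem.List.pyGetD o1 x []) 1 0 + o3 ≥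
                    PySem.List.pyGetD (PySem.List.pyGetD o2 x []) 0 0 + o4 ∧
                  PySem.List.pyGetD (PySem.List.pyGetD o1 x []) 0 0 + PySem.List.pyGetD (PySem.List.pyGetD o1 x []) 1 0 + o3 ≤
                    PySem.List.pyGetD (PySem.List.pyGetD o2 x []) 0 0 + PySem.List.pyGetD (PySem.List.pyGetD o2 x []) 1 0 + o4) <;>
      simp [complxObjScan, h, ih]

lemma foldl_pair_if {α β : Type} (P : Int → Prop) [DecidablePred P] (f : Int → α) (g : Int → β)
    (l : List Int) (acc : List α × List β) :
    l.foldl (fun acc2 y => if P y then (acc2.1 ++ [f y], acc2.2 ++ [g y]) else acc2) acc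
      = (acc.1 ++ (l.filter (fun y => decide (P y))).map f,
         acc.2 ++ (l.filter (fun y => decide (P y))).map g) := by
  induction l generalizing acc with
  | nil => simp
  | cons y rest ih =>
    by_cases h : P y <;> simp [h, ih]

lemma foldl_pair_append {α β : Type} (F : Int → List α) (G : Int → List β)
    (l : List Int) (acc : List α × List β) :
    l.foldl (fun acc2 x => (acc2.1 ++ F x, acc2.2 ++ G x)) acc
      = (acc.1 ++ l.flatMap F, acc.2 ++ l.flatMap G) := by
  induction l generalizing acc with
  | nil => simp
  | cons x rest ih => simp [ih]

lemma filter_eq_mem_singleton (l : List Int) (hl : l.Nodup) (c : Int) :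
    l.filter (fun y => decide (y = c)) = if c ∈ l then [c] else [] := by
  induction l with
  | nil => simp
  | cons y rest ih =>
    rcases List.nodup_cons.mp hl with ⟨hy, hrest⟩
    by_cases h : y = c
    · subst h
      have hnil : List.filter (fun a => decide (a = y)) rest = [] :=
        List.filter_eq_nil_iff.mpr (fun a ha => by simp; rintro rfl; exact hy ha)
      simp [hnil]
    · simp [h, ih hrest, Ne.symm h]

lemma flatMap_ite_singleton {α : Type} (P : Int → Prop) [DecidablePred P] (f : Int → α) (l : List Int) :
    l.flatMap (fun x => if P x then [f x] else []) = (l.filter (fun x => decide (P x))).map f := by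
  induction l with
  | nil => simp
  | cons x rest ih => by_cases h : P x <;> simp [h, ih]

lemma eq_of_pairwise_lt_of_mem (l1 l2 : List Int) (h1 : l1.Pairwise (· < ·)) (h2 : l2.Pairwise (· < ·))
    (hm : ∀ x, x ∈ l1 ↔ x ∈ l2) : l1 = l2 := by
  induction l1 generalizing l2 with
  | nil =>
    cases l2 with
    | nil => rfl
    | cons b t2 => exact absurd ((hm b).mpr (by simp)) (by simp)
  | cons a t1 ih =>
    cases l2 with
    | nil => exact absurd ((hm a).mp (by simp)) (by simp)
    | cons b t2 =>
      rcases List.pairwise_cons.mp h1 with ⟨ha, ht1⟩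
      rcases List.pairwise_cons.mp h2 with ⟨hb, ht2⟩
      have hab : a = b := by
        have h1' := (hm a).mp (by simp)
        have h2' := (hm b).mpr (by simp)
        simp at h1' h2'
        rcases h1' with rfl | h1' 
        · rfl
        · rcases h2' with rfl | h2'
          · rfl
          · exact absurd (lt_trans (hb a h1') (ha b h2')) (lt_irrefl b)
      subst hab
      have : t1 = t2 := by
        apply ih t2 ht1 ht2
        intro x
        constructor
        · intro hx
          have := (hm x).mp (by simp [hx])
          simp at this
          rcases this with rfl | h
          · exact absurd (ha x hx) (lt_irrefl x)
          · exact h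
        · intro hx
          have := (hm x).mpr (by simp [hx])
          simp at this
          rcases this with rfl | h
          · exact absurd (hb x hx) (lt_irrefl x)
          · exact h
      rw [this]

lemma range_filter_eq (n m d : Int) :
    (PySem.List.pyRange 0 n 1).filter (fun x => decide (0 ≤ x - d ∧ x - d < m))
      = PySem.List.pyRange (max 0 d) (min n (m + d)) 1 := by
  apply eq_of_pairwise_lt_of_mem
  · exact (PySem.List.pairwise_lt_pyRange_one 0 n).filter _
  · exact PySem.List.pairwise_lt_pyRange_one _ _
  · intro x
    simp [List.mem_filter, PySem.List.mem_pyRange_one]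
    omega

lemma pairing_eq (first second : List (List Int)) (p1 p2 : Int) :
    ((PySem.List.pyRange 0 ((first.length : Int) - 1) 1).foldl (fun acc x =>
        (PySem.List.pyRange 0 ((second.length : Int) - 1) 1).foldl (fun acc2 y =>
          if x + p1 = y + p2 then
            (acc2.1 ++ [PySem.List.pyGetD first x []], acc2.2 ++ [PySem.List.pyGetD second y []])
          else acc2) acc)
        (([] : List (List Int)), ([] : List (List Int))))
      = ((PySem.List.pyRange (max 0 (p2 - p1)) (min ((first.length : Int) - 1) ((second.length : Int) - 1 + (p2 - p1))) 1).map
            (fun x => PySem.List.pyGetD first x []),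
         (PySem.List.pyRange (max 0 (p2 - p1)) (min ((first.length : Int) - 1) ((second.length : Int) - 1 + (p2 - p1))) 1).map
            (fun x => PySem.List.pyGetD second (x - (p2 - p1)) [])) := by
  have hinner : ∀ (x : Int) (acc : List (List Int) × List (List Int)),
      (PySem.List.pyRange 0 ((second.length : Int) - 1) 1).foldl (fun acc2 y =>
          if x + p1 = y + p2 then
            (acc2.1 ++ [PySem.List.pyGetD first x []], acc2.2 ++ [PySem.List.pyGetD second y []])
          else acc2) acc
        = (acc.1 ++ (if 0 ≤ x - (p2 - p1) ∧ x - (p2 - p1) < (second.length : Int) - 1 then [PySem.List.pyGetD first x []] else []),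
           acc.2 ++ (if 0 ≤ x - (p2 - p1) ∧ x - (p2 - p1) < (second.length : Int) - 1 then [PySem.List.pyGetD second (x - (p2 - p1)) []] else [])) := by
    intro x acc
    rw [foldl_pair_if (fun y => x + p1 = y + p2) (fun _ => PySem.List.pyGetD first x []) (fun y => PySem.List.pyGetD second y [])]
    have hfil : (PySem.List.pyRange 0 ((second.length : Int) - 1) 1).filter (fun y => decide (x + p1 = y + p2))
        = (PySem.List.pyRange 0 ((second.length : Int) - 1) 1).filter (fun y => decide (y = x - (p2 - p1))) :=
      List.filter_congr (fun y _ => decide_eq_decide.mpr (by omega))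
    rw [hfil, filter_eq_mem_singleton _ (PySem.List.nodup_pyRange_one 0 _) _]
    by_cases hc : 0 ≤ x - (p2 - p1) ∧ x - (p2 - p1) < (second.length : Int) - 1
    · rw [if_pos (by rw [PySem.List.mem_pyRange_one]; omega), if_pos hc, if_pos hc]; simp
    · rw [if_neg (by rw [PySem.List.mem_pyRange_one]; omega), if_neg hc, if_neg hc]; simp
  rw [PySem.List.foldl_congr_mem _ _
        (fun (acc : List (List Int) × List (List Int)) (x : Int) =>
          (acc.1 ++ (if 0 ≤ x - (p2 - p1) ∧ x - (p2 - p1) < (second.length : Int) - 1 then [PySem.List.pyGetD first x []] else []),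
           acc.2 ++ (if 0 ≤ x - (p2 - p1) ∧ x - (p2 - p1) < (second.length : Int) - 1 then [PySem.List.pyGetD second (x - (p2 - p1)) []] else [])))
        _ (fun acc x _ => hinner x acc)]
  rw [foldl_pair_append]
  rw [flatMap_ite_singleton, flatMap_ite_singleton, range_filter_eq]
  simp

lemma scan_eq_any_dropLast (pr : List (List Int × List Int)) (o3 o4 : Int) :
    complxObjScan (pr.map Prod.fst) (pr.map Prod.snd) o3 o4
        (PySem.List.pyRange 0 (((pr.map Prod.fst).length : Int) - 1) 1)
      = if pr.dropLast.any (fun pq =>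
            decide (PySem.List.pyGetD pq.2 0 0 + o4 ≤
                    PySem.List.pyGetD pq.1 0 0 + PySem.List.pyGetD pq.1 1 0 + o3) &&
            decide (PySem.List.pyGetD pq.1 0 0 + PySem.List.pyGetD pq.1 1 0 + o3 ≤
                    PySem.List.pyGetD pq.2 0 0 + PySem.List.pyGetD pq.2 1 0 + o4))
        then some true else none := by
  rw [scan_eq_any]
  congr 1
  refine propext ?_
  simp only [List.any_eq_true, PySem.List.mem_pyRange_one, List.length_map]
  constructor
  · rintro ⟨x, ⟨hx0, hx1⟩, hc⟩
    have hxlen : x.toNat < pr.length := by omega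
    have hxdl : x.toNat < pr.dropLast.length := by
      rw [List.length_dropLast]; omega
    refine ⟨pr.dropLast[x.toNat], List.getElem_mem _, ?_⟩
    rw [PySem.List.pyGetD_eq_getElem (List.map Prod.fst pr) _ hx0 (by simp; omega),
        PySem.List.pyGetD_eq_getElem (List.map Prod.snd pr) _ hx0 (by simp; omega)] at hc
    simp only [List.getElem_map] at hc
    rw [List.getElem_dropLast]
    simp only [decide_eq_true_eq, Bool.and_eq_true] at hc ⊢
    exact ⟨hc.1, hc.2⟩
  · rintro ⟨pq, hmem, hc⟩
    obtain ⟨i, hi, heq⟩ := List.mem_iff_getElem.mp hmem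
    have hiL : i < pr.length - 1 := by simpa [List.length_dropLast] using hi
    refine ⟨(i : Int), ⟨by positivity, by omega⟩, ?_⟩
    have hlen : ((i : Int)).toNat < pr.length := by simp; omega
    rw [PySem.List.pyGetD_eq_getElem (List.map Prod.fst pr) _ (by positivity) (by simp; omega),
        PySem.List.pyGetD_eq_getElem (List.map Prod.snd pr) _ (by positivity) (by simp; omega)]
    simp only [List.getElem_map, Int.toNat_natCast]
    rw [List.getElem_dropLast] at heq
    rw [heq]
    simp only [decide_eq_true_eq, Bool.and_eq_true] at hc ⊢
    exact ⟨hc.1, hc.2⟩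

-- ===== VERDICT (by name: the statement is the Claim_ definition above) =====
theorem complxObj_spec : Claim_equal_complxObj := by
  intro first second pastePos pastePos2 _dom _pre
  unfold Spec_complxObj complxObj complxObj_alt
  dsimp only
  rw [pairing_eq]
  by_cases hswap : PySem.List.pyGetD pastePos 0 0 > PySem.List.pyGetD pastePos2 0 0
  · simp only [if_pos hswap]
    have hfst : ((PySem.List.pyRange (max 0 (PySem.List.pyGetD pastePos2 1 0 - PySem.List.pyGetD pastePos 1 0))
        (min ((first.length : Int) - 1) ((second.length : Int) - 1 + (PySem.List.pyGetD pastePos2 1 0 - PySem.List.pyGetD pastePos 1 0))) 1).map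
          (fun x => (PySem.List.pyGetD first x [], PySem.List.pyGetD second (x - (PySem.List.pyGetD pastePos2 1 0 - PySem.List.pyGetD pastePos 1 0)) []))
        |>.map (fun fs => (fs.2, fs.1))).map Prod.fst
        = (PySem.List.pyRange (max 0 (PySem.List.pyGetD pastePos2 1 0 - PySem.List.pyGetD pastePos 1 0))
            (min ((first.length : Int) - 1) ((second.length : Int) - 1 + (PySem.List.pyGetD pastePos2 1 0 - PySem.List.pyGetD pastePos 1 0))) 1).map
          (fun x => PySem.List.pyGetD second (x - (PySem.List.pyGetD pastePos2 1 0 - PySem.List.pyGetD pastePos 1 0)) []) := by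
      simp [List.map_map, Function.comp_def]
    have hsnd : ((PySem.List.pyRange (max 0 (PySem.List.pyGetD pastePos2 1 0 - PySem.List.pyGetD pastePos 1 0))
        (min ((first.length : Int) - 1) ((second.length : Int) - 1 + (PySem.List.pyGetD pastePos2 1 0 - PySem.List.pyGetD pastePos 1 0))) 1).map
          (fun x => (PySem.List.pyGetD first x [], PySem.List.pyGetD second (x - (PySem.List.pyGetD pastePos2 1 0 - PySem.List.pyGetD pastePos 1 0)) []))
        |>.map (fun fs => (fs.2, fs.1))).map Prod.snd
        = (PySem.List.pyRange (max 0 (PySem.List.pyGetD pastePos2 1 0 - PySem.List.pyGetD pastePos 1 0))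
            (min ((first.length : Int) - 1) ((second.length : Int) - 1 + (PySem.List.pyGetD pastePos2 1 0 - PySem.List.pyGetD pastePos 1 0))) 1).map
          (fun x => PySem.List.pyGetD first x []) := by
      simp [List.map_map, Function.comp_def]
    rw [← hfst, ← hsnd, scan_eq_any_dropLast, PySem.List.slice_to_neg_one]
  · simp only [if_neg hswap]
    have hfst : ((PySem.List.pyRange (max 0 (PySem.List.pyGetD pastePos2 1 0 - PySem.List.pyGetD pastePos 1 0))
        (min ((first.length : Int) - 1) ((second.length : Int) - 1 + (PySem.List.pyGetD pastePos2 1 0 - PySem.List.pyGetD pastePos 1 0))) 1).map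
          (fun x => (PySem.List.pyGetD first x [], PySem.List.pyGetD second (x - (PySem.List.pyGetD pastePos2 1 0 - PySem.List.pyGetD pastePos 1 0)) []))).map Prod.fst
        = (PySem.List.pyRange (max 0 (PySem.List.pyGetD pastePos2 1 0 - PySem.List.pyGetD pastePos 1 0))
            (min ((first.length : Int) - 1) ((second.length : Int) - 1 + (PySem.List.pyGetD pastePos2 1 0 - PySem.List.pyGetD pastePos 1 0))) 1).map
          (fun x => PySem.List.pyGetD first x []) := by
      simp [List.map_map, Function.comp_def]
    have hsnd : ((PySem.List.pyRange (max 0 (PySem.List.pyGetD pastePos2 1 0 - PySem.List.pyGetD pastePos 1 0))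
        (min ((first.length : Int) - 1) ((second.length : Int) - 1 + (PySem.List.pyGetD pastePos2 1 0 - PySem.List.pyGetD pastePos 1 0))) 1).map
          (fun x => (PySem.List.pyGetD first x [], PySem.List.pyGetD second (x - (PySem.List.pyGetD pastePos2 1 0 - PySem.List.pyGetD pastePos 1 0)) []))).map Prod.snd
        = (PySem.List.pyRange (max 0 (PySem.List.pyGetD pastePos2 1 0 - PySem.List.pyGetD pastePos 1 0))
            (min ((first.length : Int) - 1) ((second.length : Int) - 1 + (PySem.List.pyGetD pastePos2 1 0 - PySem.List.pyGetD pastePos 1 0))) 1).map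
          (fun x => PySem.List.pyGetD second (x - (PySem.List.pyGetD pastePos2 1 0 - PySem.List.pyGetD pastePos 1 0)) []) := by
      simp [List.map_map, Function.comp_def]
    rw [← hfst, ← hsnd, scan_eq_any_dropLast, PySem.List.slice_to_neg_one]
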